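-- pv_equiv track=rewrite | github.com/dikoko/practice | 3 Strings/3-08_group_substring.py | group_substrings
-- ===== SOURCE A (Python) =====
-- def is_substring_simple(term, tstr):
--     return term in tstr
--
-- def group_substrings(inlist):
--     if not inlist: return
--
--     len_in = len(inlist)
--
--     inlist.sort(key=lambda x: len(x))
--
--     out_list = []
--     while inlist:
--         picked = inlist.pop(0)
--         group = [picked]
--         for term in inlist:
--             if is_substring_simple(picked, term):
--                 group.append(term)
--
--         for term in group:
--             if term in inlist:
--                 inlist.remove(term)
--
--         out_list.append(group)
--
--     return out_list
-- ===== SOURCE B (Python) =====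
-- def group_substrings(inlist):
--     if not inlist:
--         return
--     inlist.sort(key=len)
--     groups = []
--     while inlist:
--         s = inlist.pop(0)
--         for g in groups:
--             if g[0] in s:
--                 g.append(s)
--                 break
--         else:
--             groups.append([s])
--     return groups
-- ===== Notes on version B (the rewrite author's own statement) =====
-- stated objective: faster
-- what changed: A picks the shortest remaining string as a representative, rescans the whole remaining list for members and then destructively removes each group member with repeated linear .remove passes; B makes a single element-centric pass over the sorted list, first-fit placing each string into the first accumulated group whose representative is a substring of it, with no rescans and no removal phase.
import Mathlib
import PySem

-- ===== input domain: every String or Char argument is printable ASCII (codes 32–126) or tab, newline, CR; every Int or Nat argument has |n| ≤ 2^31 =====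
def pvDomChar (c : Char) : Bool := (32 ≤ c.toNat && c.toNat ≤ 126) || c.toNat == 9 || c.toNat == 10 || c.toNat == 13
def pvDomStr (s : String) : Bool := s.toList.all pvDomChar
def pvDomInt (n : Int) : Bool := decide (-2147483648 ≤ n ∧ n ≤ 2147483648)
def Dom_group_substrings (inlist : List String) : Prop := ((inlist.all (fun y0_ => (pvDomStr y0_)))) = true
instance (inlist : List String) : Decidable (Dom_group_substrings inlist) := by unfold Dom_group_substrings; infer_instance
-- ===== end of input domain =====

-- B replaces A's representative-centric pop/scan/remove loop by an element-centric
-- first-fit placement into accumulated groups (objective: alternative decomposition).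
-- Both Pythons mutate inlist identically (sort in place, then empty it); the theorems
-- below are about the return value.

-- ===== PORT A =====
-- def is_substring_simple(term, tstr): return term in tstr
def is_substring_simple (term tstr : String) : Bool := PySem.Str.isIn term tstr

-- 'if term in inlist: inlist.remove(term)' (one step of A's second inner loop)
def pvStepA (acc : List String) (term : String) : List String :=
  if term ∈ acc then (PySem.List.remove? acc term).getD acc else acc

theorem pvStepA_length_le (acc : List String) (term : String) :
    (pvStepA acc term).length ≤ acc.length := by
  unfold pvStepA
  split_ifs with h
  · rw [PySem.List.remove?_eq_some_erase acc term h]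
    exact List.length_erase_le
  · exact le_refl _

theorem pvFold_length_le (ts : List String) :
    ∀ acc : List String, (ts.foldl pvStepA acc).length ≤ acc.length := by
  induction ts with
  | nil => intro acc; exact le_refl _
  | cons t ts ih =>
    intro acc
    exact le_trans (ih (pvStepA acc t)) (pvStepA_length_le acc t)

-- A's while-loop: pop the head, collect the group, remove the group members, recurse.
def pvLoopA (l : List String) : List (List String) :=
  match l with
  | [] => []
  | picked :: rest =>
    (picked :: rest.filter (fun term => is_substring_simple picked term)) ::
      pvLoopA ((picked :: rest.filter (fun term => is_substring_simple picked term)).foldl pvStepA rest)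
termination_by l.length
decreasing_by
  simp only [List.length_cons]
  exact Nat.lt_succ_of_le (pvFold_length_le _ rest)

def group_substrings (inlist : List String) : Option (List (List String)) :=
  if inlist = [] then none
  else some (pvLoopA (PySem.List.sorted inlist (fun x => PySem.Str.len x)))

-- ===== PORT B =====
-- for g in groups: if g[0] in s: g.append(s); break / else: groups.append([s])
-- (g[0] rendered as g.headD ""; every group B builds is nonempty)
def pvPlace (s : String) : List (List String) → List (List String)
  | [] => [[s]]
  | g :: gs =>
    if PySem.Str.isIn (g.headD "") s then (g ++ [s]) :: gs else g :: pvPlace s gs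

-- B's while-loop: pop the head, first-fit it into the accumulated groups.
def pvLoopB (gs : List (List String)) : List String → List (List String)
  | [] => gs
  | s :: rest => pvLoopB (pvPlace s gs) rest

def group_substrings_alt (inlist : List String) : Option (List (List String)) :=
  if inlist = [] then none
  else some (pvLoopB [] (PySem.List.sorted inlist (fun x => PySem.Str.len x)))

-- ===== PRECONDITION & SPEC =====
def Spec_group_substrings (inlist : List String) (out : Option (List (List String))) : Prop := out = group_substrings_alt inlist
instance (inlist : List String) (out : Option (List (List String))) : Decidable (Spec_group_substrings inlist out) := by unfold Spec_group_substrings; infer_instance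

-- ===== CLAIM (what is proved, stated in full; the proofs are below) =====
def Claim_equal_group_substrings : Prop := ∀ (inlist : List String), Dom_group_substrings inlist → Spec_group_substrings inlist (group_substrings inlist)

-- ===== LEMMAS AND PROOFS =====

theorem pvIsIn_refl (p : String) : PySem.Str.isIn p p = true := by
  rw [PySem.Str.isIn_iff_infix]

theorem pvStepA_eq (acc : List String) (t : String) :
    pvStepA acc t = if t ∈ acc then acc.erase t else acc := by
  unfold pvStepA
  split_ifs with h
  · rw [PySem.List.remove?_eq_some_erase acc t h]; rfl
  · rfl

theorem pvFilterErase (c : String → Bool) (t : String) (acc : List String) (h : c t = true) :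
    (acc.erase t).filter (fun x => !c x) = acc.filter (fun x => !c x) := by
  induction acc with
  | nil => rfl
  | cons a l ih =>
    by_cases ha : a = t
    · subst ha; simp [h]
    · simp [ha, List.filter_cons]
      split_ifs with hc <;> simp [ih]

-- the removal fold deletes exactly the c-satisfying elements, duplicates included
theorem pvFoldErase (c : String → Bool) (ts : List String) :
    ∀ acc : List String, (∀ t ∈ ts, c t = true) →
      (∀ v, c v = true → acc.count v ≤ ts.count v) →
      ts.foldl (fun a t => if t ∈ a then a.erase t else a) acc
        = acc.filter (fun x => !c x) := by
  induction ts with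
  | nil =>
    intro acc _ hcnt
    have hall : ∀ x ∈ acc, (!c x) = true := by
      intro x hx
      by_contra hcx
      have hc : c x = true := by simpa using hcx
      have h1 : 1 ≤ acc.count x := List.one_le_count_iff.mpr hx
      have := hcnt x hc
      simp at this
      omega
    simp [List.filter_eq_self.mpr hall]
  | cons t ts ih =>
    intro acc hall hcnt
    have hct : c t = true := hall t (List.mem_cons_self)
    rw [List.foldl_cons]
    by_cases hm : t ∈ acc
    · simp only [hm, if_pos]
      rw [ih (acc.erase t) (fun x hx => hall x (List.mem_cons_of_mem _ hx))
          (by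
            intro v hv
            rw [List.count_erase]
            have := hcnt v hv
            rw [List.count_cons] at this
            by_cases hvt : t = v <;> simp [hvt] at * <;> omega)]
      exact pvFilterErase c t acc hct
    · simp only [hm, if_neg, not_false_iff]
      exact ih acc (fun x hx => hall x (List.mem_cons_of_mem _ hx))
        (by
          intro v hv
          have := hcnt v hv
          rw [List.count_cons] at this
          by_cases hvt : t = v
          · subst hvt; simp [List.count_eq_zero_of_not_mem hm]
          · simpa [hvt] using this)

-- A's remove-phase leaves exactly the elements not containing picked
theorem pvRemoveAll_eq (picked : String) (rest : List String) :
    (picked :: rest.filter (fun term => is_substring_simple picked term)).foldl pvStepA rest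
      = rest.filter (fun t => !is_substring_simple picked t) := by
  have hfun : pvStepA = fun a t => if t ∈ a then a.erase t else a :=
    funext fun a => funext fun t => pvStepA_eq a t
  rw [hfun]
  apply pvFoldErase
  · intro t ht
    rcases List.mem_cons.mp ht with h | h
    · rw [h]; simpa [is_substring_simple] using pvIsIn_refl picked
    · exact (List.mem_filter.mp h).2
  · intro v hv
    rw [List.count_cons, List.count_filter hv]
    split_ifs <;> omega

-- first-fit distributes: the front group absorbs what its representative captures
theorem pvM (l : List String) :
    ∀ (a : String) (g : List String) (gs : List (List String)),
      pvLoopB ((a :: g) :: gs) l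
        = ((a :: g) ++ l.filter (fun s => PySem.Str.isIn a s))
            :: pvLoopB gs (l.filter (fun s => !PySem.Str.isIn a s)) := by
  induction l with
  | nil => intro a g gs; simp [pvLoopB]
  | cons s l ih =>
    intro a g gs
    have hstep : pvLoopB ((a :: g) :: gs) (s :: l) = pvLoopB (pvPlace s ((a :: g) :: gs)) l := rfl
    by_cases hc : PySem.Str.isIn a s = true
    · have hns : (!PySem.Str.isIn a s) = false := by rw [hc]; rfl
      have hplace : pvPlace s ((a :: g) :: gs) = ((a :: g) ++ [s]) :: gs := by
        simp only [pvPlace, List.headD_cons, hc, if_pos]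
      have hfpos : List.filter (fun x => PySem.Str.isIn a x) (s :: l)
          = s :: List.filter (fun x => PySem.Str.isIn a x) l := by
        rw [List.filter_cons]; simp only [hc, if_true]
      have hfneg : List.filter (fun x => !PySem.Str.isIn a x) (s :: l)
          = List.filter (fun x => !PySem.Str.isIn a x) l := by
        rw [List.filter_cons]; simp only [hns, Bool.false_eq_true, if_false]
      rw [hstep, hplace, hfpos, hfneg]
      simp only [List.cons_append]
      rw [ih a (g ++ [s]) gs]
      simp [List.append_assoc]
    · have hcf : PySem.Str.isIn a s = false := by simpa using hc
      have hnt : (!PySem.Str.isIn a s) = true := by rw [hcf]; rfl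
      have hplace : pvPlace s ((a :: g) :: gs) = (a :: g) :: pvPlace s gs := by
        simp only [pvPlace, List.headD_cons, if_neg hc]
      have hfpos : List.filter (fun x => PySem.Str.isIn a x) (s :: l)
          = List.filter (fun x => PySem.Str.isIn a x) l := by
        rw [List.filter_cons]; simp only [hcf, Bool.false_eq_true, if_false]
      have hfneg : List.filter (fun x => !PySem.Str.isIn a x) (s :: l)
          = s :: List.filter (fun x => !PySem.Str.isIn a x) l := by
        rw [List.filter_cons]; simp only [hnt, if_true]
      rw [hstep, hplace, ih a g (pvPlace s gs), hfpos, hfneg]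
      rfl

theorem pvAB (l : List String) : pvLoopA l = pvLoopB [] l := by
  fun_induction pvLoopA l with
  | case1 => rfl
  | case2 picked rest ih =>
    simp only [List.unattach_filter, List.unattach_attach] at ih
    have hB : pvLoopB [] (picked :: rest) = pvLoopB [[picked]] rest := rfl
    rw [hB, pvM rest picked [] []]
    rw [pvRemoveAll_eq picked rest] at ih ⊢
    rw [ih]
    simp [is_substring_simple]

-- ===== VERDICT (by name: the statement is the Claim_ definition above) =====
theorem group_substrings_spec : Claim_equal_group_substrings := by
  intro inlist _
  unfold Spec_group_substrings group_substrings group_substrings_alt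
  split_ifs with h
  · rfl
  · rw [pvAB]
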